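-- pv_equiv track=rewrite | github.com/Phumsirii/Computer-Programming-2022-2 | [09_MoreDC_34] 09_NestedList_★★★_Fill_In_Numbers.py | pattern4
-- ===== SOURCE A (Python) =====
-- def pattern4(n):
--     a=[]
--     for i in range(n):
--         a.append([0]*(n-1-i))
--     o=True
--     i=1
--     for e in a:
--         while len(e)<n:
--             e.append(i)
--             i+=1
--     for i in range(len(a)):
--         a[i]=a[i][-1::-1]
--     b=[]
--     for i in range(n):
--         b.append([])
--     for i in range(n):
--         for e in range(n):
--             b[i].append(a[e][i])
--     return b
-- ===== SOURCE B (Python) =====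
-- def pattern4(n):
--     return [[0 if r > c else 1 + c * (c + 1) // 2 + (c - r) for c in range(n)]
--             for r in range(n)]
-- ===== Notes on version B (the rewrite author's own statement) =====
-- stated objective: simpler
-- what changed: Replaces A's four-phase construction (zero-padded rows, shared-counter fill loop, row reversal, transpose) with a single nested comprehension that computes each cell directly from a closed form in its row and column indices (a triangular-number formula above the diagonal, zero below).
import Mathlib
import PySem

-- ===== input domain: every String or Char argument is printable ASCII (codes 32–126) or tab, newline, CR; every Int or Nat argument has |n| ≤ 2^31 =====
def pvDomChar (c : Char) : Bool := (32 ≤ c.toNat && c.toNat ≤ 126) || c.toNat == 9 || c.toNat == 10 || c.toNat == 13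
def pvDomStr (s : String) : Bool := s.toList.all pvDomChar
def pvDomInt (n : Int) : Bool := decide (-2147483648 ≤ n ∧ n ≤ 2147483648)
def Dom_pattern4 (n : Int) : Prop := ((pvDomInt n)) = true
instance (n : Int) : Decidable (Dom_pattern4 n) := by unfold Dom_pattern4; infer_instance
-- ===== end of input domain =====

-- B replaces A's four phases (zero-padded rows, shared-counter fill, row reversal, transpose)
-- with one nested comprehension computing each cell from a closed form (objective: simpler).

-- ===== PORT A =====
-- the Python 'while len(e)<n: e.append(i); i+=1' loop (shared counter i)
def pat4Fill (n : Int) (e : List Int) (i : Int) : List Int × Int :=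
  if h : (e.length : Int) < n then pat4Fill n (e ++ [i]) (i + 1) else (e, i)
termination_by n.toNat - e.length
decreasing_by
  simp only [List.length_append, List.length_cons, List.length_nil]
  omega

def pattern4 (n : Int) : List (List Int) :=
  -- a.append([0]*(n-1-i));  (the Python 'o=True' is never used and is dropped)
  let a := (PySem.List.pyRange 0 n 1).foldl
      (fun a i => a ++ [List.replicate (n - 1 - i).toNat (0 : Int)]) []
  -- for e in a: while len(e)<n: e.append(i); i+=1   (in-place update modelled by rebuilding a)
  let st := a.foldl (fun (st : List (List Int) × Int) e =>
      let r := pat4Fill n e st.2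
      (st.1 ++ [r.1], r.2)) ([], 1)
  -- a[i] = a[i][-1::-1]
  let a2 := (st.1).map (fun row => (PySem.List.slice? row (some (-1)) none (-1)).getD [])
  -- b.append([])
  let b0 := (PySem.List.pyRange 0 n 1).foldl (fun b _ => b ++ [([] : List Int)]) []
  -- b[i].append(a[e][i])  (indices are always in range here, so pyGetD's defaults are never used)
  (PySem.List.pyRange 0 n 1).foldl (fun b i =>
    (PySem.List.pyRange 0 n 1).foldl (fun b e =>
      b.modify i.toNat (fun row =>
        row ++ [PySem.List.pyGetD (PySem.List.pyGetD a2 e []) i 0])) b) b0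

-- ===== PORT B =====
def pattern4_alt (n : Int) : List (List Int) :=
  (PySem.List.pyRange 0 n 1).map (fun r =>
    (PySem.List.pyRange 0 n 1).map (fun c =>
      if r > c then 0 else 1 + PySem.Int.floordiv (c * (c + 1)) 2 + (c - r)))

-- ===== PRECONDITION & SPEC =====
def Spec_pattern4 (n : Int) (out : List (List Int)) : Prop := out = pattern4_alt n
instance (n : Int) (out : List (List Int)) : Decidable (Spec_pattern4 n out) := by unfold Spec_pattern4; infer_instance

-- ===== CLAIM (what is proved, stated in full; the proofs are below) =====
def Claim_equal_pattern4 : Prop := ∀ (n : Int), Dom_pattern4 n → Spec_pattern4 n (pattern4 n)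

-- ===== LEMMAS AND PROOFS =====

-- triangular numbers, the value of A's running counter after finishing k rows is 1 + tri k
def tri : Nat → Nat
  | 0 => 0
  | k + 1 => tri k + (k + 1)

-- the common closed-form matrix both ports are proved equal to
def pat4Target (m : Nat) : List (List Int) :=
  (List.range m).map (fun r =>
    (List.range m).map (fun c =>
      if c < r then (0 : Int) else (1 + (tri c : Int)) + ((c : Int) - (r : Int))))

theorem pyRange_zero_toNat (n : Int) :
    PySem.List.pyRange 0 n 1 = (List.range n.toNat).map (fun (k : Nat) => (k : Int)) := by
  rw [PySem.List.pyRange_one]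
  simp only [Int.sub_zero, zero_add]

-- the [-1::-1] slice is full reversal
theorem slice_neg1 {α : Type} (xs : List α) :
    PySem.List.slice? xs (some (-1)) none (-1) = some xs.reverse := by
  have h : PySem.List.sliceIndices xs.length (some (-1)) none (-1)
      = PySem.List.sliceIndices xs.length none none (-1) := by
    simp [PySem.List.sliceIndices]; omega
  have := PySem.List.slice?_none_none_neg_one xs
  simp [PySem.List.slice?] at this ⊢
  rw [h]; exact this

theorem two_mul_tri (c : Nat) : 2 * tri c = c * (c + 1) := by
  induction c with
  | zero => simp [tri]
  | succ c ih => simp only [tri]; rw [Nat.mul_add, ih]; ring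

theorem floordiv_tri (c : Nat) :
    PySem.Int.floordiv ((c : Int) * ((c : Int) + 1)) 2 = (tri c : Int) := by
  have h : ((c : Int) * ((c : Int) + 1)) = 2 * (tri c : Int) := by
    exact_mod_cast (two_mul_tri c).symm
  rw [h]
  simp only [PySem.Int.floordiv]
  exact Int.mul_fdiv_cancel_left _ (by norm_num)

theorem pat4Fill_spec (n : Int) : ∀ (d : Nat) (e : List Int) (i : Int),
    n.toNat - e.length = d →
    pat4Fill n e i
      = (e ++ (List.range d).map (fun (j : Nat) => i + (j : Int)), i + (d : Int)) := by
  intro d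
  induction d with
  | zero =>
    intro e i hd
    rw [pat4Fill]
    rw [dif_neg (by omega)]
    simp
  | succ d ih =>
    intro e i hd
    have h : (e.length : Int) < n := by omega
    rw [pat4Fill, dif_pos h, ih (e ++ [i]) (i + 1) (by simp; omega)]
    rw [Prod.mk.injEq]
    constructor
    · rw [List.append_assoc]
      congr 1
      rw [List.range_succ_eq_map, List.map_cons, List.map_map]
      simp only [List.singleton_append, Nat.cast_zero, List.cons.injEq]
      constructor
      · ring
      · apply List.map_congr_left
        intro j _
        simp [Function.comp]
        ring
    · push_cast
      ring

-- phases 1+2: rows after the fill loop, and the counter value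
theorem phase12 (n : Int) : ∀ (k : Nat), k ≤ n.toNat →
    ((List.range k).map (fun (c : Nat) => List.replicate (n - 1 - (c : Int)).toNat (0 : Int))).foldl
      (fun (st : List (List Int) × Int) e =>
        let r := pat4Fill n e st.2
        (st.1 ++ [r.1], r.2)) ([], 1)
    = ((List.range k).map (fun (c : Nat) =>
          List.replicate (n.toNat - 1 - c) (0 : Int)
            ++ (List.range (c + 1)).map (fun (t : Nat) => (1 + (tri c : Int)) + (t : Int))),
        1 + (tri k : Int)) := by
  intro k
  induction k with
  | zero => simp [tri]
  | succ k ih =>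
    intro hk
    rw [List.range_succ, List.map_append, List.foldl_append, ih (by omega)]
    simp only [List.map_cons, List.map_nil, List.foldl_cons, List.foldl_nil]
    have hlen : (n - 1 - (k : Int)).toNat = n.toNat - 1 - k := by omega
    have hfill := pat4Fill_spec n (k + 1)
      (List.replicate (n - 1 - (k : Int)).toNat (0 : Int)) (1 + (tri k : Int))
      (by simp [hlen]; omega)
    rw [hfill]
    rw [Prod.mk.injEq]
    constructor
    · simp [hlen, List.range_succ]
    · simp only [tri]
      push_cast
      ring

-- a row after the [-1::-1] reversal
theorem row3_eq (m c : Nat) :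
    (List.replicate (m - 1 - c) (0 : Int)
        ++ (List.range (c + 1)).map (fun (t : Nat) => (1 + (tri c : Int)) + (t : Int))).reverse
    = ((List.range (c + 1)).map (fun (t : Nat) => (1 + (tri c : Int)) + (t : Int))).reverse
        ++ List.replicate (m - 1 - c) (0 : Int) := by
  rw [List.reverse_append, List.reverse_replicate]

theorem row3_getD (m c r : Nat) (hc : c < m) (hr : r < m) :
    (((List.range (c + 1)).map (fun (t : Nat) => (1 + (tri c : Int)) + (t : Int))).reverse
        ++ List.replicate (m - 1 - c) (0 : Int)).getD r 0
    = (if c < r then (0 : Int) else (1 + (tri c : Int)) + ((c : Int) - (r : Int))) := by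
  have hlen : (((List.range (c + 1)).map (fun (t : Nat) => (1 + (tri c : Int)) + (t : Int))).reverse
      ++ List.replicate (m - 1 - c) (0 : Int)).length = m := by
    simp; omega
  have hr' : r < (((List.range (c + 1)).map (fun (t : Nat) => (1 + (tri c : Int)) + (t : Int))).reverse
      ++ List.replicate (m - 1 - c) (0 : Int)).length := by omega
  rw [List.getD_eq_getElem _ _ hr']
  by_cases h : c < r
  · rw [if_pos h]
    rw [List.getElem_append_right (by simp; omega)]
    exact List.getElem_replicate _
  · rw [if_neg h]
    rw [List.getElem_append_left (by simp; omega)]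
    rw [List.getElem_reverse]
    simp only [List.length_map, List.length_range]
    rw [List.getElem_map]
    rw [List.getElem_range]
    congr 1
    have : c + 1 - 1 - r = c - r := by omega
    rw [this]
    push_cast [Nat.cast_sub (by omega : r ≤ c)]
    ring

-- composition of two modifies at the same index
theorem modify_modify_same {α : Type} (b : List α) (i : Nat) (f g : α → α) :
    (b.modify i f).modify i g = b.modify i (fun x => g (f x)) := by
  apply List.ext_getElem
  · simp
  · intro j h1 h2
    simp only [List.getElem_modify]
    split_ifs with h
    · subst h; simp
    · simp

-- the inner transpose loop appends one element per e to row i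
theorem foldl_modify_append {α β : Type} (g : β → α) (i : Nat) :
    ∀ (xs : List β) (b : List (List α)),
    xs.foldl (fun b x => b.modify i (fun row => row ++ [g x])) b
      = b.modify i (fun row => row ++ xs.map g) := by
  intro xs
  induction xs with
  | nil =>
    intro b
    simp only [List.foldl_nil, List.map_nil, List.append_nil]
    apply List.ext_getElem
    · simp
    · intro j h1 h2
      rw [List.getElem_modify]
      split <;> rfl
  | cons x rest ih =>
    intro b
    rw [List.foldl_cons, ih, modify_modify_same]
    simp

-- the outer transpose loop, row by row
theorem phase4 (m : Nat) (g : Int → Int → Int) : ∀ (k : Nat), k ≤ m →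
    ((List.range k).map (fun (r : Nat) => (r : Int))).foldl
      (fun b i =>
        ((List.range m).map (fun (e : Nat) => (e : Int))).foldl
          (fun b e => b.modify i.toNat (fun row => row ++ [g i e])) b)
      (List.replicate m ([] : List Int))
    = (List.range m).map (fun r =>
        if r < k then (List.range m).map (fun (e : Nat) => g (r : Int) (e : Int)) else []) := by
  intro k
  induction k with
  | zero =>
    intro _
    simp [List.map_const']
  | succ k ih =>
    intro hk
    rw [List.range_succ, List.map_append, List.foldl_append, ih (by omega)]
    simp only [List.map_cons, List.map_nil, List.foldl_cons, List.foldl_nil]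
    rw [foldl_modify_append (fun (e : Int) => g ((k : Nat) : Int) e) (((k : Nat) : Int)).toNat]
    apply List.ext_getElem
    · simp
    · intro j h1 h2
      simp only [List.length_modify, List.length_map, List.length_range] at h1 h2
      rw [List.getElem_modify]
      simp only [List.getElem_map, List.getElem_range, Int.toNat_natCast, List.map_map]
      by_cases hkj : k = j
      · subst hkj
        rw [if_pos rfl, if_neg (by omega : ¬ k < k), if_pos (by omega : k < k + 1), List.nil_append]
        apply List.map_congr_left
        intro e _
        simp [Function.comp]
      · rw [if_neg hkj]
        by_cases hjk : j < k
        · rw [if_pos hjk, if_pos (by omega)]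
        · rw [if_neg hjk, if_neg (by omega)]

theorem pattern4_eq_target (n : Int) : pattern4 n = pat4Target n.toNat := by
  unfold pattern4
  simp only
  rw [pyRange_zero_toNat]
  rw [PySem.List.foldl_append_singleton_eq_map, List.nil_append, List.map_map]
  have h12 := phase12 n n.toNat (le_refl _)
  simp only [Function.comp_def] at h12 ⊢
  rw [h12]
  simp only
  set m := n.toNat with hm
  -- evaluate the reversal of each row
  have ha2 : ((List.range m).map (fun c =>
        List.replicate (m - 1 - c) (0 : Int)
          ++ (List.range (c + 1)).map (fun (t : Nat) => (1 + (tri c : Int)) + (t : Int)))).map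
        (fun row => (PySem.List.slice? row (some (-1)) none (-1)).getD [])
      = (List.range m).map (fun c =>
          ((List.range (c + 1)).map (fun (t : Nat) => (1 + (tri c : Int)) + (t : Int))).reverse
            ++ List.replicate (m - 1 - c) (0 : Int)) := by
    rw [List.map_map]
    apply List.map_congr_left
    intro c _
    simp only [Function.comp_def]
    rw [slice_neg1, Option.getD_some, row3_eq]
  rw [ha2]
  -- initial b is m empty rows
  rw [PySem.List.foldl_append_singleton_eq_map, List.nil_append, List.map_map]
  have hb0 : (List.map ((fun _ => ([] : List Int)) ∘ (fun (k : Nat) => (k : Int))) (List.range m))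
      = List.replicate m ([] : List Int) := by
    simp only [Function.comp_def]
    rw [List.map_const']
    simp
  rw [hb0]
  -- the transpose double loop
  rw [phase4 m (fun (i e : Int) =>
      PySem.List.pyGetD
        (PySem.List.pyGetD ((List.range m).map (fun c =>
          ((List.range (c + 1)).map (fun (t : Nat) => (1 + (tri c : Int)) + (t : Int))).reverse
            ++ List.replicate (m - 1 - c) 0)) e [])
        i 0) m (le_refl _)]
  unfold pat4Target
  apply List.map_congr_left
  intro r hr
  rw [List.mem_range] at hr
  rw [if_pos hr]
  apply List.map_congr_left
  intro c hc
  rw [List.mem_range] at hc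
  simp only [PySem.List.pyGetD_natCast]
  rw [PySem.List.getD_map_range _ _ _ _ hc, row3_getD m c r hc hr]

theorem pattern4_alt_eq_target (n : Int) : pattern4_alt n = pat4Target n.toNat := by
  unfold pattern4_alt pat4Target
  rw [pyRange_zero_toNat, List.map_map]
  apply List.map_congr_left
  intro r _
  simp only [Function.comp_def]
  rw [List.map_map]
  apply List.map_congr_left
  intro c _
  simp only [Function.comp_def]
  rw [floordiv_tri c]
  by_cases h : c < r
  · rw [if_pos (by exact_mod_cast h), if_pos h]
  · rw [if_neg (by exact_mod_cast h), if_neg h]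

-- ===== VERDICT (by name: the statement is the Claim_ definition above) =====
theorem pattern4_spec : Claim_equal_pattern4 := by
  intro n _
  unfold Spec_pattern4
  rw [pattern4_eq_target, pattern4_alt_eq_target]
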